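-- pv_equiv track=rewrite | github.com/sapienzastudents/exercises | Progettazione di Algoritmi/canale2/2018_2019/esercizi/programmazione_dinamica/dinamica_max_valore.py | es4
-- ===== SOURCE A (Python) =====
-- def es4(lista):
--     n = len(lista)
--
--     T = [0 for _ in range(n)] # Tabella di supporto
--     T[0] = lista[0]
--     max_index = 0
--
--     for i in range(1, n):
--         T[i] = max(lista[i], T[i - 1] + lista[i])
--         max_index = max_index if T[max_index] >= T[i] else i
--
--     # Ricostruisco la tupla.
--     sum_value = lista[max_index]
--     left_index = max_index
--     while sum_value != T[max_index]:
--         left_index -= 1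
--         sum_value += lista[left_index]
--
--     return sum_value, (left_index, max_index)
-- ===== SOURCE B (Python) =====
-- def es4(lista):
--     # Single-pass online Kadane: no DP table, no reconstruction loop.
--     cur = lista[0]
--     start = 0
--     best_v, best_l, best_r = lista[0], 0, 0
--     for i in range(1, len(lista)):
--         if cur <= 0:
--             cur = lista[i]
--             start = i
--         else:
--             cur += lista[i]
--         if cur > best_v:
--             best_v, best_l, best_r = cur, start, i
--     return best_v, (best_l, best_r)
-- ===== Notes on version B (the rewrite author's own statement) =====
-- stated objective: simpler
-- what changed: Replaced the O(n)-space DP table, separate argmax tracking and backward reconstruction while-loop by a single online Kadane pass that carries the running sum, its left boundary and the best triple in O(1) space; measurably faster by a constant factor (no table allocation or reconstruction pass).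
import Mathlib
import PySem

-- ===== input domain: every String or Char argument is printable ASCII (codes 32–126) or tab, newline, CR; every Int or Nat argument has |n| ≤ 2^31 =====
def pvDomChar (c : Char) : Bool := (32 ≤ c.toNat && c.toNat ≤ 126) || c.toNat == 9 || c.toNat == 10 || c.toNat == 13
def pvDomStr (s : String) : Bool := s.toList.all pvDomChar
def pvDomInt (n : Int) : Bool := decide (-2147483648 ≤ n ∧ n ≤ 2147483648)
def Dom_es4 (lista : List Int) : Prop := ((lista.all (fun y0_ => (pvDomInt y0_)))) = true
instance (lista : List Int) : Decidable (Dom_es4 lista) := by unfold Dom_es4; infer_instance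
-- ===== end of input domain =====

-- B replaces A's DP table + argmax + backward reconstruction by one online Kadane pass (simpler, O(1) extra space); return values agree on every nonempty list.

-- ===== PORT A =====
-- loop body of `for i in range(1, n)`: updates T[i] and max_index (state (T, max_index))
def es4Step (lista : List Int) (st : List Int × Nat) (i : Int) : List Int × Nat :=
  let T := st.1
  let m := st.2
  let iN := i.toNat            -- i ranges over 1..n-1, always a nonnegative in-range index
  let Ti := max (lista.getD iN 0) (T.getD (iN - 1) 0 + lista.getD iN 0)
  let T' := T.set iN Ti
  (T', if T'.getD m 0 ≥ T'.getD iN 0 then m else iN)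

-- the `while sum_value != T[max_index]` reconstruction; structural recursion on left_index
-- (under Pre_ the loop provably stops before left_index reaches 0; the 0-case is unreachable there)
def es4Recon (lista T : List Int) (m : Nat) (sum : Int) (left : Nat) : Int × Nat :=
  if sum = T.getD m 0 then (sum, left)
  else
    match left with
    | 0 => (sum, 0)
    | Nat.succ l => es4Recon lista T m (sum + lista.getD l 0) l

def es4 (lista : List Int) : Int × (Int × Int) :=
  let n := lista.length
  -- builds the zero table and writes the first element into slot 0 (indexing the first
  -- element raises IndexError on the empty list: excluded by Pre_)
  let T0 := (List.replicate n 0).set 0 (lista.getD 0 0)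
  let st := (PySem.List.pyRange 1 (n : Int) 1).foldl (es4Step lista) (T0, 0)
  let r := es4Recon lista st.1 st.2 (lista.getD st.2 0) st.2
  (r.1, ((r.2 : Int), (st.2 : Int)))

-- ===== PORT B =====
-- loop body: state (cur, start, best_v, best_l, best_r)
def es4AltStep (lista : List Int) (st : Int × Nat × Int × Nat × Nat) (i : Int) : Int × Nat × Int × Nat × Nat :=
  let iN := i.toNat
  let cur' := if st.1 ≤ 0 then lista.getD iN 0 else st.1 + lista.getD iN 0
  let start' := if st.1 ≤ 0 then iN else st.2.1
  if cur' > st.2.2.1 then (cur', start', cur', start', iN)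
  else (cur', start', st.2.2.1, st.2.2.2.1, st.2.2.2.2)

def es4_alt (lista : List Int) : Int × (Int × Int) :=
  -- cur starts as the first element (IndexError on the empty list: excluded by Pre_)
  let st := (PySem.List.pyRange 1 (lista.length : Int) 1).foldl (es4AltStep lista)
      (lista.getD 0 0, 0, lista.getD 0 0, 0, 0)
  (st.2.2.1, ((st.2.2.2.1 : Int), (st.2.2.2.2 : Int)))

-- ===== PRECONDITION & SPEC =====
-- Pre_ excludes only the empty list, on which both Pythons raise IndexError at the initial indexing of the first element.
def Pre_es4 (lista : List Int) : Prop := lista ≠ []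
instance (lista : List Int) : Decidable (Pre_es4 lista) := by unfold Pre_es4; infer_instance
def pvWitness_es4 : List Int := [1, -2, 3]

def Spec_es4 (lista : List Int) (out : Int × (Int × Int)) : Prop := out = es4_alt lista
instance (lista : List Int) (out : Int × (Int × Int)) : Decidable (Spec_es4 lista out) := by unfold Spec_es4; infer_instance

-- ===== CLAIM (what is proved, stated in full; the proofs are below) =====
def Claim_equal_es4 : Prop := ∀ (lista : List Int), Dom_es4 lista → Pre_es4 lista → Spec_es4 lista (es4 lista)

-- ===== LEMMAS AND PROOFS =====

-- sum of lista[a..b] (inclusive); empty when b+1 ≤ a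
def pvSeg (l : List Int) (a b : Nat) : Int := ((List.range' a (b + 1 - a)).map (fun j => l.getD j 0)).sum

-- the DP value T[j] of A / running value cur of B
def pvKad (l : List Int) : Nat → Int
  | 0 => l.getD 0 0
  | j + 1 => max (l.getD (j + 1) 0) (pvKad l j + l.getD (j + 1) 0)

lemma pvSeg_self (l : List Int) (a : Nat) : pvSeg l a a = l.getD a 0 := by
  simp [pvSeg, List.range'_one]

lemma pvSeg_succ_right (l : List Int) (a k : Nat) (h : a ≤ k + 1) :
    pvSeg l a (k + 1) = pvSeg l a k + l.getD (k + 1) 0 := by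
  have h1 : k + 1 + 1 - a = (k + 1 - a) + 1 := by omega
  have h2 : a + (k + 1 - a) = k + 1 := by omega
  simp [pvSeg, h1, List.range'_concat, h2]

lemma pvSeg_cons (l : List Int) (a b : Nat) (h : a ≤ b) :
    pvSeg l a b = l.getD a 0 + pvSeg l (a + 1) b := by
  have h1 : b + 1 - a = (b - a) + 1 := by omega
  have h2 : b + 1 - (a + 1) = b - a := by omega
  simp [pvSeg, h1, h2, List.range'_succ]

lemma pvSeg_split (l : List Int) (a c b : Nat) (h1 : a ≤ c) (h2 : c ≤ b) :
    pvSeg l a b = pvSeg l a c + pvSeg l (c + 1) b := by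
  have happ : List.range' a (c + 1 - a) ++ List.range' (a + 1 * (c + 1 - a)) (b - c)
      = List.range' a ((c + 1 - a) + (b - c)) := List.range'_append
  have hst : a + 1 * (c + 1 - a) = c + 1 := by omega
  rw [hst] at happ
  have hlen : b + 1 - a = (c + 1 - a) + (b - c) := by omega
  have hb : b + 1 - (c + 1) = b - c := by omega
  simp [pvSeg, hlen, ← happ, hb]

-- getD facts for List.set
lemma getD_set_self (T : List Int) (i : Nat) (v : Int) (h : i < T.length) :
    (T.set i v).getD i 0 = v := by
  simp [List.getD_eq_getElem?_getD, h]

lemma getD_set_ne (T : List Int) (i j : Nat) (v : Int) (h : i ≠ j) :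
    (T.set i v).getD j 0 = T.getD j 0 := by
  simp [List.getD_eq_getElem?_getD, List.getElem?_set_ne h]

lemma pvKad_succ_eq (l : List Int) (k : Nat) :
    pvKad l (k + 1) = if pvKad l k ≤ 0 then l.getD (k + 1) 0 else pvKad l k + l.getD (k + 1) 0 := by
  simp only [pvKad]
  by_cases h : pvKad l k ≤ 0
  · rw [if_pos h]; omega
  · rw [if_neg h]; omega

-- invariant after the loops have processed indices 1..K-1
def pvInv (l : List Int) (K : Nat) (T : List Int) (m : Nat)
    (cur : Int) (start : Nat) (bv : Int) (bl br : Nat) : Prop :=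
  T.length = l.length ∧
  (∀ j, j ≤ K - 1 → T.getD j 0 = pvKad l j) ∧
  m = br ∧ br ≤ K - 1 ∧
  cur = pvKad l (K - 1) ∧
  start ≤ K - 1 ∧ cur = pvSeg l start (K - 1) ∧
  (∀ j, start ≤ j → j < K - 1 → 0 < pvSeg l start j) ∧
  bv = pvKad l br ∧ bv = pvSeg l bl br ∧ bl ≤ br ∧
  (∀ j, bl ≤ j → j < br → 0 < pvSeg l bl j)

lemma pv_main (l : List Int) (hl : 0 < l.length) :
    ∀ K, 1 ≤ K → K ≤ l.length →
    pvInv l K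
      ((PySem.List.pyRange 1 (K : Int) 1).foldl (es4Step l)
        (((List.replicate l.length 0).set 0 (l.getD 0 0)), 0)).1
      ((PySem.List.pyRange 1 (K : Int) 1).foldl (es4Step l)
        (((List.replicate l.length 0).set 0 (l.getD 0 0)), 0)).2
      ((PySem.List.pyRange 1 (K : Int) 1).foldl (es4AltStep l)
        (l.getD 0 0, 0, l.getD 0 0, 0, 0)).1
      ((PySem.List.pyRange 1 (K : Int) 1).foldl (es4AltStep l)
        (l.getD 0 0, 0, l.getD 0 0, 0, 0)).2.1
      ((PySem.List.pyRange 1 (K : Int) 1).foldl (es4AltStep l)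
        (l.getD 0 0, 0, l.getD 0 0, 0, 0)).2.2.1
      ((PySem.List.pyRange 1 (K : Int) 1).foldl (es4AltStep l)
        (l.getD 0 0, 0, l.getD 0 0, 0, 0)).2.2.2.1
      ((PySem.List.pyRange 1 (K : Int) 1).foldl (es4AltStep l)
        (l.getD 0 0, 0, l.getD 0 0, 0, 0)).2.2.2.2 := by
  intro K hK
  induction K, hK using Nat.le_induction with
  | base =>
    intro _
    have hr : PySem.List.pyRange 1 ((1 : Nat) : Int) 1 = [] :=
      PySem.List.pyRange_one_eq_nil (by norm_num)
    simp only [hr, List.foldl_nil]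
    refine ⟨by simp, ?_, rfl, Nat.le_refl _, by simp [pvKad], Nat.le_refl _,
      by simp [pvSeg_self], ?_, by simp [pvKad], by simp [pvSeg_self], Nat.le_refl _, ?_⟩
    · intro j hj
      interval_cases j
      rw [getD_set_self _ _ _ (by simpa using hl)]
      simp [pvKad]
    · intro j h1 h2; omega
    · intro j h1 h2; omega
  | succ K hK ih =>
    intro hKn
    have hK1 : K ≤ l.length := by omega
    have ihv := ih hK1
    have hr : PySem.List.pyRange 1 ((K + 1 : Nat) : Int) 1
        = PySem.List.pyRange 1 (K : Int) 1 ++ [(K : Int)] := by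
      have := PySem.List.pyRange_one_succ_right (a := 1) (b := (K : Int))
        (by exact_mod_cast hK)
      push_cast
      exact this
    simp only [hr, List.foldl_append, List.foldl_cons, List.foldl_nil]
    set stA := (PySem.List.pyRange 1 (K : Int) 1).foldl (es4Step l)
        (((List.replicate l.length 0).set 0 (l.getD 0 0)), 0) with hstA
    set stB := (PySem.List.pyRange 1 (K : Int) 1).foldl (es4AltStep l)
        (l.getD 0 0, 0, l.getD 0 0, 0, 0) with hstB
    obtain ⟨hTlen, hTj, hmbr, hbrle, hcur, hstle, hcseg, hcpos, hbv, hbseg, hblbr, hbpos⟩ := ihv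
    have hKpos : 1 ≤ K := hK
    have hKlt : K < l.length := by omega
    have htoNat : ((K : Int)).toNat = K := Int.toNat_natCast K
    -- rewritten both step applications
    simp only [es4Step, es4AltStep, htoNat]
    -- A side new table value
    have hTprev : stA.1.getD (K - 1) 0 = pvKad l (K - 1) := hTj _ (Nat.le_refl _)
    have hKad : max (l.getD K 0) (stA.1.getD (K - 1) 0 + l.getD K 0) = pvKad l K := by
      rw [hTprev]
      have : K = (K - 1) + 1 := by omega
      rw [this]
      simp [pvKad]
    have hlenSet : (stA.1.set K (max (l.getD K 0) (stA.1.getD (K - 1) 0 + l.getD K 0))).length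
        = l.length := by simp [hTlen]
    have hgetK : (stA.1.set K (max (l.getD K 0) (stA.1.getD (K - 1) 0 + l.getD K 0))).getD K 0
        = pvKad l K := by
      rw [getD_set_self _ _ _ (by omega : K < stA.1.length)]
      exact hKad
    have hgetOld : ∀ j, j ≤ K - 1 →
        (stA.1.set K (max (l.getD K 0) (stA.1.getD (K - 1) 0 + l.getD K 0))).getD j 0
          = pvKad l j := by
      intro j hj
      rw [getD_set_ne _ _ _ _ (by omega)]
      exact hTj j hj
    have hgetM : (stA.1.set K (max (l.getD K 0) (stA.1.getD (K - 1) 0 + l.getD K 0))).getD stA.2 0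
        = pvKad l stA.2 := hgetOld _ (by omega)
    -- B side new cur
    have hK1e : K = (K - 1) + 1 := by omega
    have hcur' : (if stB.1 ≤ 0 then l.getD K 0 else stB.1 + l.getD K 0) = pvKad l K := by
      rw [hcur]
      conv_rhs => rw [hK1e, pvKad_succ_eq, ← hK1e]
    -- conditions agree: A keeps m iff T[m] ≥ T[K] iff ¬ (cur' > bv)
    have hcond : ((stA.1.set K (max (l.getD K 0) (stA.1.getD (K - 1) 0 + l.getD K 0))).getD stA.2 0
          ≥ (stA.1.set K (max (l.getD K 0) (stA.1.getD (K - 1) 0 + l.getD K 0))).getD K 0)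
        ↔ ¬ ((if stB.1 ≤ 0 then l.getD K 0 else stB.1 + l.getD K 0) > stB.2.2.1) := by
      rw [hgetM, hgetK, hcur', hmbr, ← hbv]
      constructor <;> intro h <;> omega
    -- start' facts
    have hstart' : (if stB.1 ≤ 0 then K else stB.2.1) ≤ K ∧
        (if stB.1 ≤ 0 then l.getD K 0 else stB.1 + l.getD K 0)
          = pvSeg l (if stB.1 ≤ 0 then K else stB.2.1) K ∧
        (∀ j, (if stB.1 ≤ 0 then K else stB.2.1) ≤ j → j < K →
          0 < pvSeg l (if stB.1 ≤ 0 then K else stB.2.1) j) := by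
      by_cases h0 : stB.1 ≤ 0
      · simp only [if_pos h0]
        exact ⟨Nat.le_refl _, by rw [pvSeg_self], by intro j h1 h2; omega⟩
      · simp only [if_neg h0]
        refine ⟨by omega, ?_, ?_⟩
        · have : K = (K - 1) + 1 := by omega
          rw [this, pvSeg_succ_right _ _ _ (by omega), ← this, ← hcseg]
        · intro j h1 h2
          rcases Nat.lt_or_ge j (K - 1) with hlt | hge
          · exact hcpos j h1 hlt
          · have : j = K - 1 := by omega
            rw [this, ← hcseg]; omega
    -- now split on the update condition
    by_cases hgt : (if stB.1 ≤ 0 then l.getD K 0 else stB.1 + l.getD K 0) > stB.2.2.1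
    · -- best updates on both sides
      have hA : ¬ ((stA.1.set K (max (l.getD K 0) (stA.1.getD (K - 1) 0 + l.getD K 0))).getD stA.2 0
          ≥ (stA.1.set K (max (l.getD K 0) (stA.1.getD (K - 1) 0 + l.getD K 0))).getD K 0) := by
        rw [hcond]; exact not_not_intro hgt
      simp only [if_neg hA, if_pos hgt]
      refine ⟨hlenSet, ?_, rfl, Nat.le_refl _, hcur', hstart'.1, hstart'.2.1, hstart'.2.2,
        hcur', hstart'.2.1, hstart'.1, hstart'.2.2⟩
      intro j hj
      rcases Nat.lt_or_ge j K with hlt | hge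
      · exact hgetOld j (by omega)
      · have : j = K := by omega
        rw [this]; exact hgetK
    · have hA : ((stA.1.set K (max (l.getD K 0) (stA.1.getD (K - 1) 0 + l.getD K 0))).getD stA.2 0
          ≥ (stA.1.set K (max (l.getD K 0) (stA.1.getD (K - 1) 0 + l.getD K 0))).getD K 0) := by
        rw [hcond]; exact hgt
      simp only [if_pos hA, if_neg hgt]
      refine ⟨hlenSet, ?_, hmbr, by omega, hcur', hstart'.1, hstart'.2.1, hstart'.2.2,
        hbv, hbseg, hblbr, hbpos⟩
      intro j hj
      rcases Nat.lt_or_ge j K with hlt | hge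
      · exact hgetOld j (by omega)
      · have : j = K := by omega
        rw [this]; exact hgetK

-- the reconstruction loop returns (bv, bl)
lemma recon_correct (l T : List Int) (m bl : Nat) (bv : Int)
    (hT : T.getD m 0 = bv) (hseg : pvSeg l bl m = bv) (hble : bl ≤ m)
    (hpos : ∀ j, bl ≤ j → j < m → 0 < pvSeg l bl j) :
    ∀ d li, li = bl + d → li ≤ m → es4Recon l T m (pvSeg l li m) li = (bv, bl) := by
  intro d
  induction d with
  | zero =>
    intro li hli hlim
    simp only [Nat.add_zero] at hli
    subst hli
    rw [es4Recon.eq_def, if_pos (by rw [hT, hseg]), hseg]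
  | succ d ih =>
    intro li hli hlim
    obtain ⟨l', rfl⟩ : ∃ l', li = l' + 1 := ⟨li - 1, by omega⟩
    have hsplit := pvSeg_split l bl l' m (by omega) (by omega)
    have hp : 0 < pvSeg l bl l' := hpos l' (by omega) (by omega)
    have hne : pvSeg l (l' + 1) m ≠ T.getD m 0 := by
      rw [hT, ← hseg]
      omega
    rw [es4Recon.eq_def, if_neg hne]
    show es4Recon l T m (pvSeg l (l' + 1) m + l.getD l' 0) l' = (bv, bl)
    have harg : pvSeg l (l' + 1) m + l.getD l' 0 = pvSeg l l' m := by
      rw [pvSeg_cons l l' m (by omega)]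
      ring
    rw [harg]
    exact ih l' (by omega) (by omega)

-- ===== VERDICT (by name: the statement is the Claim_ definition above) =====
theorem es4_spec : Claim_equal_es4 := by
  intro lista _ hpre
  unfold Spec_es4
  have hl : 0 < lista.length := List.length_pos_of_ne_nil hpre
  have hmain := pv_main lista hl lista.length hl (Nat.le_refl _)
  simp only at hmain
  obtain ⟨hTlen, hTj, hmbr, hbrle, hcur, hstle, hcseg, hcpos, hbv, hbseg, hblbr, hbpos⟩ := hmain
  set stA := (PySem.List.pyRange 1 (lista.length : Int) 1).foldl (es4Step lista)
      (((List.replicate lista.length 0).set 0 (lista.getD 0 0)), 0) with hstA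
  set stB := (PySem.List.pyRange 1 (lista.length : Int) 1).foldl (es4AltStep lista)
      (lista.getD 0 0, 0, lista.getD 0 0, 0, 0) with hstB
  have hTm : stA.1.getD stA.2 0 = stB.2.2.1 := by
    rw [hTj stA.2 (by omega), hmbr, ← hbv]
  have hrec := recon_correct lista stA.1 stA.2 stB.2.2.2.1 stB.2.2.1 hTm
      (by rw [hmbr]; exact hbseg.symm) (by omega)
      (by rw [hmbr]; exact hbpos)
      (stA.2 - stB.2.2.2.1) stA.2 (by omega) (Nat.le_refl _)
  rw [pvSeg_self] at hrec
  unfold es4 es4_alt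
  simp only [← hstA, ← hstB]
  rw [hrec, hmbr]
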